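-- pv_equiv track=rewrite | github.com/ivan-gerov/advent_of_code_2020 | day6/day6_find_bug.py | get_matching_answers_1
-- ===== SOURCE A (Python) =====
-- from collections import Counter
--
-- def get_matching_answers_1(group):
--     people = [''.join(list(set(person))) for person in group.split('\n')]
--     if len(people) > 1:
--         counter = Counter(''.join(people))
--         dupes = [k for k, v in counter.items()
--                 if v > 1]
--         dupes = ''.join(sorted(dupes))
--         if len(dupes) < 1:
--             dupes = ''
--         return dupes
--     else:
--         answers = ''.join(sorted([ans for ans in people[0]]))
--         return answers
-- ===== SOURCE B (Python) =====
-- def get_matching_answers_1(group):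
--     lines = group.split('\n')
--     if len(lines) == 1:
--         return ''.join(sorted(set(lines[0])))
--     seen = set()
--     dupes = set()
--     for line in lines:
--         s = set(line)
--         dupes |= seen & s
--         seen |= s
--     return ''.join(sorted(dupes))
-- ===== Notes on version B (the rewrite author's own statement) =====
-- stated objective: alternative
-- what changed: Replaces A's Counter table (count characters of the concatenated dedup'd person strings, filter items with v>1, sort the keys) with a single pass over the lines keeping two running sets: dupes accumulates (seen & current line's set) and seen accumulates the union, so no per-character counts exist at all; the result is the sorted dupes set.
import Mathlib
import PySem

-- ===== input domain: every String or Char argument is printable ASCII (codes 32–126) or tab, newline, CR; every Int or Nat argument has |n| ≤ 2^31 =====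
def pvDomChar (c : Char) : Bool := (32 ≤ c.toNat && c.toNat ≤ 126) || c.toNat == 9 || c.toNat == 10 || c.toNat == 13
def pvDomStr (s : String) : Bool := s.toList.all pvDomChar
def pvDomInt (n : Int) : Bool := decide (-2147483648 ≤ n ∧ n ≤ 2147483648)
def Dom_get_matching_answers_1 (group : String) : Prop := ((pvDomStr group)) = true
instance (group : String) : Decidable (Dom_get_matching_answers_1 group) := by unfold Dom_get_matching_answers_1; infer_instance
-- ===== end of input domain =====

-- B drops A's Counter table (count chars of the concatenated dedup'd person strings, filter
-- items with v>1, sort the keys) for a single pass over the lines with two running sets: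
-- dupes |= seen & set(line); seen |= set(line) — no counts exist at all (objective:
-- alternative). Both results end in sorted(), so they are independent of Python's set
-- iteration order; the ports model set order as first-insertion order.

-- ===== PORT A =====
-- strings are handled on List Char (PySem.Chars); ''.join of the person-strings is Chars.join []
def get_matching_answers_1 (group : String) : String :=
  let people : List (PySem.Set Char) :=
    (PySem.Chars.splitOn group.toList ['\n']).map (fun person => PySem.Set.ofList person)
  if people.length > 1 then
    let counter := PySem.Dict.counter (PySem.Chars.join [] people)
    let dupes := (counter.items.filter (fun kv => decide (1 < kv.2))).map (fun kv => kv.1)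
    let dupes := PySem.List.sorted dupes (fun x => x)
    let dupes := if dupes.length < 1 then [] else dupes
    String.ofList dupes
  else
    String.ofList (PySem.List.sorted (PySem.List.pyGetD people 0 []) (fun x => x))

-- ===== PORT B =====
def get_matching_answers_1_alt (group : String) : String :=
  let lines := PySem.Chars.splitOn group.toList ['\n']
  if lines.length == 1 then
    String.ofList (PySem.List.sorted (PySem.Set.ofList (PySem.List.pyGetD lines 0 [])) (fun x => x))
  else
    let st := lines.foldl
      (fun (st : PySem.Set Char × PySem.Set Char) line =>
        let s := PySem.Set.ofList line
        (PySem.Set.union st.1 (PySem.Set.inter st.2 s), PySem.Set.union st.2 s))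
      (PySem.Set.empty, PySem.Set.empty)
    String.ofList (PySem.List.sorted st.1 (fun x => x))

-- ===== PRECONDITION & SPEC =====
def Spec_get_matching_answers_1 (group : String) (out : String) : Prop := out = get_matching_answers_1_alt group
instance (group : String) (out : String) : Decidable (Spec_get_matching_answers_1 group out) := by unfold Spec_get_matching_answers_1; infer_instance

-- ===== CLAIM (what is proved, stated in full; the proofs are below) =====
def Claim_equal_get_matching_answers_1 : Prop := ∀ (group : String), Dom_get_matching_answers_1 group → Spec_get_matching_answers_1 group (get_matching_answers_1 group)

-- ===== LEMMAS AND PROOFS =====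

lemma flatten_intersperse_nil (l : List (List Char)) :
    (List.intersperse ([] : List Char) l).flatten = l.flatten := by
  induction l with
  | nil => rfl
  | cons a t ih =>
    cases t with
    | nil => rfl
    | cons b t2 => simpa [List.intersperse_cons₂] using ih

-- membership in both components of B's two-accumulator fold
lemma fold_mem (sets : List (PySem.Set Char)) (dupes seen : PySem.Set Char) (c : Char) :
    (c ∈ (sets.foldl
        (fun (st : PySem.Set Char × PySem.Set Char) s =>
          (PySem.Set.union st.1 (PySem.Set.inter st.2 s), PySem.Set.union st.2 s))
        (dupes, seen)).1
      ↔ c ∈ dupes ∨ (c ∈ seen ∧ c ∈ sets.flatten) ∨ 2 ≤ sets.countP (fun s => decide (c ∈ s)))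
    ∧ (c ∈ (sets.foldl
        (fun (st : PySem.Set Char × PySem.Set Char) s =>
          (PySem.Set.union st.1 (PySem.Set.inter st.2 s), PySem.Set.union st.2 s))
        (dupes, seen)).2
      ↔ c ∈ seen ∨ c ∈ sets.flatten) := by
  induction sets generalizing dupes seen with
  | nil => simp
  | cons s rest ih =>
    have hmemcount : c ∈ rest.flatten ↔ 0 < rest.countP (fun t => decide (c ∈ t)) := by
      rw [List.countP_pos_iff, List.mem_flatten]
      simp
    have hPM : 2 ≤ rest.countP (fun t => decide (c ∈ t)) → c ∈ rest.flatten :=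
      fun h => hmemcount.mpr (by omega)
    simp only [List.foldl_cons, List.flatten_cons, List.countP_cons, List.mem_append]
    rw [(ih _ _).1, (ih _ _).2]
    simp only [PySem.Set.mem_union, PySem.Set.mem_inter]
    by_cases hcs : c ∈ s
    · have hQ : (2 ≤ rest.countP (fun t => decide (c ∈ t)) + 1) ↔ c ∈ rest.flatten := by
        rw [hmemcount]; omega
      simp only [hcs, decide_true, if_true]
      constructor
      · constructor <;> intro h <;> tauto
      · constructor <;> intro h <;> tauto
    · simp only [hcs, decide_false]
      constructor
      · constructor <;> intro h <;> tauto
      · constructor <;> intro h <;> tauto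

lemma fold_nodup (sets : List (PySem.Set Char)) (dupes seen : PySem.Set Char)
    (hd : dupes.Nodup) (hs : seen.Nodup) :
    (sets.foldl
        (fun (st : PySem.Set Char × PySem.Set Char) s =>
          (PySem.Set.union st.1 (PySem.Set.inter st.2 s), PySem.Set.union st.2 s))
        (dupes, seen)).1.Nodup := by
  induction sets generalizing dupes seen with
  | nil => exact hd
  | cons s rest ih =>
    exact ih _ _ (PySem.Set.nodup_union _ _ hd) (PySem.Set.nodup_union _ _ hs)

-- count of a char in the flattened nodup sets = number of sets containing it
lemma count_flatten_eq_countP (c : Char) (sets : List (PySem.Set Char))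
    (h : ∀ s ∈ sets, List.Nodup s) :
    sets.flatten.count c = sets.countP (fun s => decide (c ∈ s)) := by
  induction sets with
  | nil => simp
  | cons s rest ih =>
    have hs : s.Nodup := h s (by simp)
    have hrest := ih (fun t ht => h t (by simp [ht]))
    simp only [List.flatten_cons, List.count_append, List.countP_cons, hrest]
    by_cases hc : c ∈ s
    · simp [List.count_eq_one_of_mem hs hc, hc, Nat.add_comm]
    · simp [List.count_eq_zero_of_not_mem hc, hc]

lemma if_len_lt_one (l : List Char) : (if l.length < 1 then ([] : List Char) else l) = l := by
  cases l <;> simp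

-- the multi-line branch: A's sorted filtered Counter keys = B's sorted dupes set
lemma branch_eq (sets : List (PySem.Set Char)) (h : ∀ s ∈ sets, List.Nodup s) :
    PySem.List.sorted
      ((((PySem.Dict.counter (PySem.Chars.join [] sets)).items.filter
          (fun kv => decide (1 < kv.2))).map (fun kv => kv.1))) (fun x => x)
    = PySem.List.sorted
        (sets.foldl
          (fun (st : PySem.Set Char × PySem.Set Char) s =>
            (PySem.Set.union st.1 (PySem.Set.inter st.2 s), PySem.Set.union st.2 s))
          (PySem.Set.empty, PySem.Set.empty)).1 (fun x => x) := by
  have hjoin : PySem.Chars.join [] sets = sets.flatten := by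
    simp [PySem.Chars.join, List.intercalate, flatten_intersperse_nil]
  have hA : (((PySem.Dict.counter (PySem.Chars.join [] sets)).items.filter
      (fun kv => decide (1 < kv.2))).map (fun kv => kv.1))
      = (PySem.Set.ofList sets.flatten).filter (fun k => decide (1 < (sets.flatten.count k : Int))) := by
    rw [hjoin, PySem.Dict.items_counter, List.filter_map, List.map_map]
    simp [Function.comp_def]
  rw [hA]
  rw [PySem.List.sorted_id_eq_sorted_id_iff_perm]
  apply (List.perm_ext_iff_of_nodup (List.Nodup.filter _ (PySem.Set.nodup_ofList sets.flatten))
    (fold_nodup sets _ _ List.nodup_nil List.nodup_nil)).mpr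
  intro c
  rw [List.mem_filter, (fold_mem sets [] [] c).1]
  have hcount := count_flatten_eq_countP c sets h
  simp only [PySem.Set.mem_ofList, List.not_mem_nil, false_and, false_or,
    decide_eq_true_eq]
  constructor
  · rintro ⟨hmem, hlt⟩
    have : 1 < sets.flatten.count c := by exact_mod_cast hlt
    omega
  · intro h2
    have h2' : 2 ≤ sets.flatten.count c := by omega
    refine ⟨List.count_pos_iff.mp (by omega), ?_⟩
    exact_mod_cast (by omega : (1:Int) < (sets.flatten.count c : Int))

-- ===== VERDICT (by name: the statement is the Claim_ definition above) =====
theorem get_matching_answers_1_spec : Claim_equal_get_matching_answers_1 := by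
  unfold Claim_equal_get_matching_answers_1
  intro group _
  unfold Spec_get_matching_answers_1 get_matching_answers_1 get_matching_answers_1_alt
  simp only []
  generalize PySem.Chars.splitOn group.toList ['\n'] = L
  rcases L with _ | ⟨a, _ | ⟨b, t⟩⟩
  · rfl
  · rfl
  · rw [if_pos (by simp), if_len_lt_one, if_neg (by simp)]
    congr 1
    rw [branch_eq ((a :: b :: t).map (fun person => PySem.Set.ofList person))
      (by intro s hs; obtain ⟨line, _, rfl⟩ := List.mem_map.mp hs
          exact PySem.Set.nodup_ofList line)]
    simp only [List.foldl_map]
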